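-- pv_equiv track=rewrite | github.com/paulluneaug/PythonFirstProjects | Divers Jeux/2048/2048.py | comp_list
-- ===== SOURCE A (Python) =====
-- def comp_list(list0):
--     """
--     Compacte la liste en argument en regroupant les couples valeurs identiques
--     voisines et en en supprimant une et en ajoutant 1 à l'autre :
--         Ex: [4, 2, 2] devient [4, 3]
--             [3, 2, 2, 2, 2] devient [3, 3, 3]
--
--     Arguments:
--         -list0: type=list
--             Liste représentant une ligne ou une colonne à compacter
--
--     Returns:
--         -list_comp: type=list
--             Liste représentant une ligne ou une colonne compactée
--     """
--     list_comp=[]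
--     compactable=True #
--
--     if len(list0)==1: #Elimine le cas où la liste ne compte qu'un seul élément
--         list_comp=list0
--     else:
--         for i in range(len(list0)-1):
--
--             if list0[i]==list0[i+1] and compactable: #Teste si l'élément i de la
--                 list_comp.append(list0[i]+1)         #liste et son voisin sont
--                 compactable=False                    #les mêmes et si on peut
--                                                      #les compacter
--             elif compactable :
--                 list_comp.append(list0[i])
--
--             else:
--                 compactable=True
--
--             if i==len(list0)-2 and compactable:
--                 list_comp.append(list0[i+1])
--
--     return list_comp
-- ===== SOURCE B (Python) =====
-- def comp_list(list0):
--     if len(list0) == 1: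
--         return list0
--     res = []
--     i = 0
--     while i < len(list0) - 1:
--         if list0[i] == list0[i + 1]:
--             res.append(list0[i] + 1)
--             i += 2
--         else:
--             res.append(list0[i])
--             i += 1
--     if i == len(list0) - 1:
--         res.append(list0[i])
--     return res
-- ===== Notes on version B (the rewrite author's own statement) =====
-- stated objective: simpler
-- what changed: Replaces A's for-loop over all indices with a boolean 'compactable' skip-flag and an in-loop last-element special case by a while loop whose cursor jumps 2 positions on a merge and 1 otherwise, appending the trailing element once after the loop.
import Mathlib
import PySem

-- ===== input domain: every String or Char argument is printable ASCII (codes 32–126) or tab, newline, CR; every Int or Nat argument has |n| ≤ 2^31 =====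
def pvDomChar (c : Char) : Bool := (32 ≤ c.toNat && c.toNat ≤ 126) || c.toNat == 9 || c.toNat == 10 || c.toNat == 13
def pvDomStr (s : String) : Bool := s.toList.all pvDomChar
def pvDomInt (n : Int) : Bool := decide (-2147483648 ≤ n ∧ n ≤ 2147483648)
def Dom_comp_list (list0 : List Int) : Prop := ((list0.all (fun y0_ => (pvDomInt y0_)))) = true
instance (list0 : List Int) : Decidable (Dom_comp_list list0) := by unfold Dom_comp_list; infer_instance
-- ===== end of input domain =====

-- B replaces A's boolean skip-flag loop (with its in-loop last-element special case) by a
-- jumping cursor that advances 2 on a merge and 1 otherwise; objective: simpler.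

-- ===== PORT A =====
-- loop body of A's for-loop: state = (list_comp, compactable)
def pvBodyA (l : List Int) (st : List Int × Bool) (i : Int) : List Int × Bool :=
  let st' :=
    if PySem.List.pyGetD l i 0 = PySem.List.pyGetD l (i + 1) 0 ∧ st.2 then
      (st.1 ++ [PySem.List.pyGetD l i 0 + 1], false)
    else if st.2 then
      (st.1 ++ [PySem.List.pyGetD l i 0], st.2)
    else
      (st.1, true)
  if i = (l.length : Int) - 2 ∧ st'.2 then
    (st'.1 ++ [PySem.List.pyGetD l (i + 1) 0], st'.2)
  else st'

def comp_list (list0 : List Int) : List Int :=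
  if list0.length = 1 then list0
  else
    ((PySem.List.pyRange 0 ((list0.length : Int) - 1) 1).foldl (pvBodyA list0) ([], true)).1

-- ===== PORT B =====
-- B's while loop: cursor i jumps by 2 on a merge, by 1 otherwise; trailing element kept
def compAltGo (l : List Int) (i : Nat) : List Int :=
  if h : i + 1 < l.length then
    if l.getD i 0 = l.getD (i + 1) 0 then
      (l.getD i 0 + 1) :: compAltGo l (i + 2)
    else
      l.getD i 0 :: compAltGo l (i + 1)
  else if i + 1 = l.length then [l.getD i 0]
  else []
termination_by l.length - i

def comp_list_alt (list0 : List Int) : List Int :=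
  if list0.length = 1 then list0
  else compAltGo list0 0

-- ===== PRECONDITION & SPEC =====
def Spec_comp_list (list0 : List Int) (out : List Int) : Prop := out = comp_list_alt list0
instance (list0 : List Int) (out : List Int) : Decidable (Spec_comp_list list0 out) := by unfold Spec_comp_list; infer_instance

-- ===== CLAIM (what is proved, stated in full; the proofs are below) =====
def Claim_equal_comp_list : Prop := ∀ (list0 : List Int), Dom_comp_list list0 → Spec_comp_list list0 (comp_list list0)

-- ===== LEMMAS AND PROOFS =====

-- evaluation of A's loop body at a Nat-cast index, compactable = true
lemma pvBodyA_true (l acc : List Int) (i : Nat) :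
    pvBodyA l (acc, true) (i : Int) =
      if l.getD i 0 = l.getD (i + 1) 0 then (acc ++ [l.getD i 0 + 1], false)
      else if i + 2 = l.length then (acc ++ [l.getD i 0] ++ [l.getD (i + 1) 0], true)
      else (acc ++ [l.getD i 0], true) := by
  have hc : (i : Int) + 1 = ((i + 1 : Nat) : Int) := by push_cast; ring
  have hcond : ((i : Int) = (l.length : Int) - 2) ↔ (i + 2 = l.length) := by omega
  simp only [pvBodyA, hc, PySem.List.pyGetD_natCast]
  by_cases heq : l.getD i 0 = l.getD (i + 1) 0 <;>
    by_cases hl : i + 2 = l.length <;> simp_all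

-- evaluation of A's loop body, compactable = false
lemma pvBodyA_false (l acc : List Int) (i : Nat) :
    pvBodyA l (acc, false) (i : Int) =
      if i + 2 = l.length then (acc ++ [l.getD (i + 1) 0], true) else (acc, true) := by
  have hc : (i : Int) + 1 = ((i + 1 : Nat) : Int) := by push_cast; ring
  have hcond : ((i : Int) = (l.length : Int) - 2) ↔ (i + 2 = l.length) := by omega
  simp only [pvBodyA, hc, PySem.List.pyGetD_natCast]
  by_cases hl : i + 2 = l.length <;> simp [hl, hcond]

-- A's fold from position i with compactable = true produces acc ++ compAltGo l i
-- (and from compactable = false it skips position i, producing acc ++ compAltGo l (i+1))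
lemma pv_loop_eq (l : List Int) :
    ∀ k i, i ≤ l.length - 2 → 2 ≤ l.length → l.length - i ≤ k → ∀ acc : List Int,
      ((PySem.List.pyRange (i : Int) ((l.length : Int) - 1) 1).foldl (pvBodyA l) (acc, true)).1
        = acc ++ compAltGo l i ∧
      ((PySem.List.pyRange (i : Int) ((l.length : Int) - 1) 1).foldl (pvBodyA l) (acc, false)).1
        = acc ++ compAltGo l (i + 1) := by
  intro k
  induction k with
  | zero => intro i hi h2 hk; omega
  | succ k ih =>
    intro i hi h2 hk acc
    have hlt : (i : Int) < (l.length : Int) - 1 := by omega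
    have hc : (i : Int) + 1 = ((i + 1 : Nat) : Int) := by push_cast; ring
    have h1 : i + 1 < l.length := by omega
    rw [PySem.List.pyRange_one_cons hlt, List.foldl_cons, List.foldl_cons, hc,
        pvBodyA_true, pvBodyA_false]
    by_cases hlast : i + 2 = l.length
    · -- last iteration: the remaining range is empty
      have hnil : PySem.List.pyRange ((i + 1 : Nat) : Int) ((l.length : Int) - 1) 1 = [] :=
        PySem.List.pyRange_one_eq_nil (by omega)
      rw [hnil]
      constructor
      · by_cases heq : l.getD i 0 = l.getD (i + 1) 0
        · rw [if_pos heq, List.foldl_nil, compAltGo, dif_pos h1, if_pos heq, compAltGo,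
              dif_neg (by omega : ¬ (i + 2 + 1 < l.length))]
          simp [show ¬ (i + 2 + 1 = l.length) by omega]
        · rw [if_neg heq, if_pos hlast, List.foldl_nil, compAltGo, dif_pos h1, if_neg heq,
              compAltGo, dif_neg (by omega : ¬ (i + 1 + 1 < l.length))]
          simp [show i + 1 + 1 = l.length by omega]
      · rw [if_pos hlast, List.foldl_nil, compAltGo,
            dif_neg (by omega : ¬ (i + 1 + 1 < l.length))]
        simp [show i + 1 + 1 = l.length by omega]
    · -- i + 2 < length : recurse with the induction hypothesis at i + 1
      constructor
      · by_cases heq : l.getD i 0 = l.getD (i + 1) 0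
        · rw [if_pos heq, compAltGo, dif_pos h1, if_pos heq,
              (ih (i + 1) (by omega) h2 (by omega) (acc ++ [l.getD i 0 + 1])).2]
          simp
        · rw [if_neg heq, if_neg hlast, compAltGo, dif_pos h1, if_neg heq,
              (ih (i + 1) (by omega) h2 (by omega) (acc ++ [l.getD i 0])).1]
          simp
      · rw [if_neg hlast, (ih (i + 1) (by omega) h2 (by omega) acc).1]

-- ===== VERDICT (by name: the statement is the Claim_ definition above) =====
theorem comp_list_spec : Claim_equal_comp_list := by
  intro l _
  unfold Spec_comp_list comp_list comp_list_alt
  by_cases h1 : l.length = 1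
  · simp [h1]
  · simp only [h1, if_false]
    by_cases h0 : l.length = 0
    · rw [PySem.List.pyRange_one_eq_nil (by omega), List.foldl_nil, compAltGo,
          dif_neg (by omega : ¬ (0 + 1 < l.length))]
      simp [show ¬ (0 + 1 = l.length) by omega]
    · have h2 : 2 ≤ l.length := by omega
      have := (pv_loop_eq l l.length 0 (by omega) h2 (by omega) []).1
      simpa using this
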